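-- pv_equiv track=rewrite | github.com/nerdmecha/git-bash-python | main.py | secondary
-- ===== SOURCE A (Python) =====
-- def secondary(k): # sum 1 to k
--     j, sum = 0, 0
--     while(j < k):
--         j += 1
--         if (j%2==1):
--             continue
--         sum += j
--     return sum
-- ===== SOURCE B (Python) =====
-- def secondary(k):
--     m = max(k, 0) // 2
--     return m * (m + 1)
-- ===== Notes on version B (the rewrite author's own statement) =====
-- stated objective: faster
-- what changed: replaced the linear while-loop summing the even numbers up to k with the closed form m*(m+1) where m = max(k,0)//2
import Mathlib
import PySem

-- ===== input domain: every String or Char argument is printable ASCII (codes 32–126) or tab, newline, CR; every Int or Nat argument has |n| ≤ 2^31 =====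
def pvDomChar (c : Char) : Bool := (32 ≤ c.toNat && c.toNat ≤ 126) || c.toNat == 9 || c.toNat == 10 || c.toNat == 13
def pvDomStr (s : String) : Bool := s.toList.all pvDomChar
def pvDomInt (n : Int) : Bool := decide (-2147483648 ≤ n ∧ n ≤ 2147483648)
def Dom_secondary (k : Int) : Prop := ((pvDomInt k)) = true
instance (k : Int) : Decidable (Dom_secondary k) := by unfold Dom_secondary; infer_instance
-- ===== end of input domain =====

-- B replaces A's O(k) while-loop over 1..k with the closed form m*(m+1), m = max(k,0)//2 (faster).


-- ===== PORT A =====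
-- literal port of A's while loop: state (j, sum), j incremented, odd j skipped
def secondaryLoop (k j sum : Int) : Int :=
  if j < k then
    if PySem.Int.mod (j + 1) 2 = 1 then secondaryLoop k (j + 1) sum
    else secondaryLoop k (j + 1) (sum + (j + 1))
  else sum
termination_by (k - j).toNat
decreasing_by all_goals omega

def secondary (k : Int) : Int := secondaryLoop k 0 0

-- ===== PORT B =====
def secondary_alt (k : Int) : Int :=
  let m := PySem.Int.floordiv (max k 0) 2
  m * (m + 1)

-- ===== PRECONDITION & SPEC =====
def Spec_secondary (k : Int) (out : Int) : Prop := out = secondary_alt k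
instance (k : Int) (out : Int) : Decidable (Spec_secondary k out) := by unfold Spec_secondary; infer_instance

-- ===== CLAIM (what is proved, stated in full; the proofs are below) =====
def Claim_equal_secondary : Prop := ∀ (k : Int), Dom_secondary k → Spec_secondary k (secondary k)

-- ===== LEMMAS AND PROOFS =====

-- g t = sum of even numbers in [1, t] for t ≥ 0
def pvG (t : Int) : Int := (t / 2) * (t / 2 + 1)

theorem pvG_step (j : Int) (hj : 0 ≤ j) :
    pvG (j + 1) = pvG j + (if PySem.Int.mod (j + 1) 2 = 1 then 0 else j + 1) := by
  unfold pvG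
  have h2 : PySem.Int.mod (j + 1) 2 = (j + 1) % 2 := by
    simp only [PySem.Int.mod]; rw [Int.fmod_eq_emod]; simp
  rw [h2]
  rcases Int.emod_two_eq_zero_or_one j with h | h
  · -- j even: j + 1 odd
    have hd : (j + 1) / 2 = j / 2 := by omega
    have : (j + 1) % 2 = 1 := by omega
    simp [this, hd]
  · -- j odd: j + 1 even
    have hm : (j + 1) % 2 = 0 := by omega
    have hd : (j + 1) / 2 = j / 2 + 1 := by omega
    simp [hm, hd]; ring_nf; omega

theorem secondaryLoop_eq (n : ℕ) : ∀ (k j s : Int), 0 ≤ j → k = j + n →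
    secondaryLoop k j s = s + pvG k - pvG j := by
  induction n with
  | zero =>
    intro k j s hj hk
    rw [secondaryLoop]
    have : ¬ j < k := by omega
    simp [hk]
  | succ m ih =>
    intro k j s hj hk
    rw [secondaryLoop]
    have hlt : j < k := by omega
    have hstep := pvG_step j hj
    simp only [hlt, if_pos]
    split_ifs with hm <;>
      rw [ih k (j + 1) _ (by omega) (by omega)] <;>
      simp only [hm, if_pos, ite_false] at hstep <;> omega

-- ===== VERDICT (by name: the statement is the Claim_ definition above) =====
theorem secondary_spec : Claim_equal_secondary := by
  intro k _
  unfold Spec_secondary secondary secondary_alt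
  have hfd : PySem.Int.floordiv (max k 0) 2 = (max k 0) / 2 := by
    simp only [PySem.Int.floordiv]; rw [Int.fdiv_eq_ediv]; simp
  by_cases hk : k ≤ 0
  · rw [secondaryLoop]
    have : ¬ (0:Int) < k := by omega
    rw [hfd, max_eq_right hk]
    simp [this]
  · rw [not_le] at hk
    have hmax : max k 0 = k := max_eq_left (by omega)
    rw [secondaryLoop_eq k.toNat k 0 0 le_rfl (by omega)]
    rw [hfd, hmax]
    simp [pvG]
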